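-- pv_equiv track=rewrite | github.com/hrbatra/gather_ctx | gather_ctx.py | find_python_symbol_end
-- ===== SOURCE A (Python) =====
-- def leading_indent_width(text: str) -> int:
--     expanded = text.replace("\t", "    ")
--     return len(expanded) - len(expanded.lstrip(" "))
--
-- def find_python_symbol_header_end(lines: list[str], start_idx: int) -> int:
--     paren_balance = 0
--     for idx in range(start_idx, len(lines)):
--         line = lines[idx]
--         stripped = line.strip()
--         if not stripped:
--             continue
--         paren_balance += line.count("(") - line.count(")")
--         if stripped.endswith(":") and paren_balance <= 0:
--             return idx
--     return start_idx
--
-- def find_python_symbol_end(lines: list[str], start_idx: int, indent: int) -> int: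
--     header_end_idx = find_python_symbol_header_end(lines, start_idx)
--     for idx in range(header_end_idx + 1, len(lines)):
--         line = lines[idx]
--         stripped = line.strip()
--         if not stripped:
--             continue
--         current_indent = leading_indent_width(line)
--         if current_indent <= indent and not stripped.startswith("#"):
--             return idx
--     return len(lines)
-- ===== SOURCE B (Python) =====
-- def _indent_cols(line: str) -> int:
--     # column width of the leading whitespace run (tab = 4 columns)
--     w = 0
--     for ch in line:
--         if ch == ' ':
--             w += 1
--         elif ch == '\t':
--             w += 4
--         else:
--             break
--     return w
--
-- def find_python_symbol_end(lines: list[str], start_idx: int, indent: int) -> int: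
--     # Single forward pass: header phase and body phase merged; while still in the
--     # header we also remember the first body-qualifying line after start_idx, which
--     # is the answer if the scan ends without ever finding a ':' header end.
--     n = len(lines)
--     in_header = True
--     paren_balance = 0
--     fallback = None
--     for idx in range(start_idx, n):
--         line = lines[idx]
--         stripped = line.strip()
--         if not in_header:
--             if stripped and not stripped.startswith("#") and _indent_cols(line) <= indent:
--                 return idx
--             continue
--         if (fallback is None and idx > start_idx and stripped
--                 and not stripped.startswith("#") and _indent_cols(line) <= indent):
--             fallback = idx
--         if stripped:
--             paren_balance += line.count("(") - line.count(")")
--             if stripped.endswith(":") and paren_balance <= 0: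
--                 in_header = False
--     if in_header and fallback is not None:
--         return fallback
--     return n
-- ===== Notes on version B (the rewrite author's own statement) =====
-- stated objective: alternative
-- what changed: A runs two separate scans (a header scan to find the ':' line, then a second scan over the tail for the first dedented body line); B is one merged forward pass with an in_header phase flag that also remembers the would-be answer after start_idx as a fallback for the no-header case, and counts indent columns directly instead of expanding tabs and stripping.
import Mathlib
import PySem

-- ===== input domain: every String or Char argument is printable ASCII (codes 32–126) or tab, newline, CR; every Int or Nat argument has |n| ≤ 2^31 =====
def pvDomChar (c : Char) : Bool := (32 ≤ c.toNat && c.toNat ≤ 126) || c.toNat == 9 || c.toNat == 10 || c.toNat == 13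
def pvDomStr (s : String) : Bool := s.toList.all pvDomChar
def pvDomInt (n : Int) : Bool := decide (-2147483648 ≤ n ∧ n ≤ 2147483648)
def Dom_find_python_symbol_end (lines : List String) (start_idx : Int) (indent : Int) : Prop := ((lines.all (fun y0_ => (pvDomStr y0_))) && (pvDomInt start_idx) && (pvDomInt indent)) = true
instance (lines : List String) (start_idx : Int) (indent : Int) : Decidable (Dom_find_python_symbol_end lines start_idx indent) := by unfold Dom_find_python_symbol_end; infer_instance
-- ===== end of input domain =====

-- B merges A's two scans (header scan + body scan) into one forward pass that tracks a
-- header/body phase flag and remembers the no-header fallback answer; alternative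
-- decomposition, same asymptotic cost.


-- ===== PORT A =====
def leading_indent_width (text : String) : Int :=
  let expanded := PySem.Str.replace text "\t" "    "
  -- Python's lstrip(" ") (strip only the space character) has no PySem primitive;
  -- hand port, exact: dropWhile (· == ' ') is exactly what lstrip(" ") removes.
  PySem.Str.len expanded - ((expanded.toList.dropWhile (· == ' ')).length : Int)

def find_python_symbol_header_end_go (lines : List String) (start_idx : Int) :
    List Int → Int → Int
  | [], _ => start_idx
  | idx :: rest, paren_balance =>
    let line := PySem.List.pyGetD lines idx ""
    let stripped := PySem.Str.strip line
    if stripped = "" then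
      find_python_symbol_header_end_go lines start_idx rest paren_balance
    else
      let pb := paren_balance + (PySem.Str.count line "(" : Int) - (PySem.Str.count line ")" : Int)
      if PySem.Str.endswith stripped ":" = true ∧ pb ≤ 0 then idx
      else find_python_symbol_header_end_go lines start_idx rest pb

def find_python_symbol_header_end (lines : List String) (start_idx : Int) : Int :=
  find_python_symbol_header_end_go lines start_idx
    (PySem.List.pyRange start_idx (lines.length : Int)) 0

def find_python_symbol_end_go (lines : List String) (indent : Int) : List Int → Int
  | [] => (lines.length : Int)
  | idx :: rest =>
    let line := PySem.List.pyGetD lines idx ""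
    let stripped := PySem.Str.strip line
    if stripped = "" then find_python_symbol_end_go lines indent rest
    else
      let current_indent := leading_indent_width line
      if current_indent ≤ indent ∧ PySem.Str.startswith stripped "#" = false then idx
      else find_python_symbol_end_go lines indent rest

def find_python_symbol_end (lines : List String) (start_idx : Int) (indent : Int) : Int :=
  let header_end_idx := find_python_symbol_header_end lines start_idx
  find_python_symbol_end_go lines indent
    (PySem.List.pyRange (header_end_idx + 1) (lines.length : Int))

-- ===== PORT B =====
def indent_cols_go : List Char → Int
  | [] => 0
  | c :: cs =>
    if c = ' ' then 1 + indent_cols_go cs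
    else if c = '\t' then 4 + indent_cols_go cs
    else 0

def indent_cols (line : String) : Int := indent_cols_go line.toList

def find_python_symbol_end_alt_go (lines : List String) (start_idx indent : Int) :
    List Int → Bool → Int → Option Int → Int
  | [], in_header, _, fallback =>
    if in_header = true then
      match fallback with
      | some f => f
      | none => (lines.length : Int)
    else (lines.length : Int)
  | idx :: rest, in_header, paren_balance, fallback =>
    let line := PySem.List.pyGetD lines idx ""
    let stripped := PySem.Str.strip line
    if in_header = false then
      if stripped ≠ "" ∧ PySem.Str.startswith stripped "#" = false ∧ indent_cols line ≤ indent
      then idx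
      else find_python_symbol_end_alt_go lines start_idx indent rest false paren_balance fallback
    else
      let fallback' :=
        if fallback = none ∧ start_idx < idx ∧ stripped ≠ "" ∧
            PySem.Str.startswith stripped "#" = false ∧ indent_cols line ≤ indent
        then some idx else fallback
      if stripped ≠ "" then
        let pb := paren_balance + (PySem.Str.count line "(" : Int) - (PySem.Str.count line ")" : Int)
        if PySem.Str.endswith stripped ":" = true ∧ pb ≤ 0 then
          find_python_symbol_end_alt_go lines start_idx indent rest false pb fallback'
        else
          find_python_symbol_end_alt_go lines start_idx indent rest true pb fallback'
      else find_python_symbol_end_alt_go lines start_idx indent rest true paren_balance fallback'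

def find_python_symbol_end_alt (lines : List String) (start_idx : Int) (indent : Int) : Int :=
  find_python_symbol_end_alt_go lines start_idx indent
    (PySem.List.pyRange start_idx (lines.length : Int)) true 0 none

-- ===== PRECONDITION & SPEC =====
-- Pre_ excludes only inputs where Python A raises IndexError (an index below -len(lines)
-- reached by the scan); B raises there too.
def Pre_find_python_symbol_end (lines : List String) (start_idx : Int) (indent : Int) : Prop :=
  -(lines.length : Int) ≤ start_idx
instance (lines : List String) (start_idx : Int) (indent : Int) : Decidable (Pre_find_python_symbol_end lines start_idx indent) := by unfold Pre_find_python_symbol_end; infer_instance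

def pvWitness_find_python_symbol_end : List String × Int × Int :=
  (["def f(x):", "    return x", "y = 1"], 0, 0)

def Spec_find_python_symbol_end (lines : List String) (start_idx : Int) (indent : Int) (out : Int) : Prop := out = find_python_symbol_end_alt lines start_idx indent
instance (lines : List String) (start_idx : Int) (indent : Int) (out : Int) : Decidable (Spec_find_python_symbol_end lines start_idx indent out) := by unfold Spec_find_python_symbol_end; infer_instance

-- ===== CLAIM (what is proved, stated in full; the proofs are below) =====
def Claim_equal_find_python_symbol_end : Prop := ∀ (lines : List String) (start_idx : Int) (indent : Int), Dom_find_python_symbol_end lines start_idx indent → Pre_find_python_symbol_end lines start_idx indent → Spec_find_python_symbol_end lines start_idx indent (find_python_symbol_end lines start_idx indent)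

-- ===== LEMMAS AND PROOFS =====

-- body-qualifying test for line index idx (the test of A's second loop / B's body phase)
def pvQ (lines : List String) (indent : Int) (idx : Int) : Bool :=
  let line := PySem.List.pyGetD lines idx ""
  let stripped := PySem.Str.strip line
  decide (stripped ≠ "" ∧ PySem.Str.startswith stripped "#" = false ∧ indent_cols line ≤ indent)

theorem replace_go_single (t : Char) (new : List Char) :
    ∀ (fuel : Nat) (l acc : List Char), l.length ≤ fuel →
    PySem.Chars.replace.go [t] new fuel l acc
      = acc.reverse ++ l.flatMap (fun c => if c = t then new else [c]) := by
  intro fuel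
  induction fuel with
  | zero =>
    intro l acc h
    have : l = [] := List.length_eq_zero_iff.mp (Nat.le_zero.mp h)
    subst this; simp [PySem.Chars.replace.go]
  | succ n ih =>
    intro l acc h
    match l with
    | [] => simp [PySem.Chars.replace.go]
    | c :: rest =>
      rw [PySem.Chars.replace.go]
      by_cases hc : c = t
      · subst hc
        simp only [List.isPrefixOf, BEq.rfl, Bool.and_self, if_true]
        rw [ih _ _ (by simpa using Nat.le_of_succ_le_succ h)]
        simp
      · have hpre : [t].isPrefixOf (c :: rest) = false := by
          simp only [List.isPrefixOf, Bool.and_true]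
          exact decide_eq_false (fun hh => hc hh.symm)
        rw [hpre]
        simp only [Bool.false_eq_true, if_false]
        rw [ih _ _ (by simpa using Nat.le_of_succ_le_succ h)]
        simp [hc]

theorem replace_single (t : Char) (new : List Char) (cs : List Char) :
    PySem.Chars.replace cs [t] new = cs.flatMap (fun c => if c = t then new else [c]) := by
  rw [PySem.Chars.replace]
  simp only [List.isEmpty_cons, Bool.false_eq_true, if_false]
  exact replace_go_single t new cs.length cs [] le_rfl

theorem indent_list (cs : List Char) :
    (((cs.flatMap (fun c => if c = '\t' then [' ',' ',' ',' '] else [c])).length : Int)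
      - (((cs.flatMap (fun c => if c = '\t' then [' ',' ',' ',' '] else [c])).dropWhile (· == ' ')).length : Int))
      = indent_cols_go cs := by
  induction cs with
  | nil => simp [indent_cols_go]
  | cons c rest ih =>
    rw [List.flatMap_cons, indent_cols_go]
    by_cases ht : c = '\t'
    · subst ht
      rw [if_pos rfl, if_neg (by decide)]
      simp only [List.cons_append, List.nil_append]
      rw [show ∀ L, List.dropWhile (· == ' ') (' '::' '::' '::' '::L) = List.dropWhile (· == ' ') L
        from fun L => by simp [List.dropWhile]]
      simp only [List.length_cons]
      push_cast
      omega
    · by_cases hsp : c = ' '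
      · subst hsp
        rw [if_neg (by decide), if_pos rfl]
        simp only [List.cons_append, List.nil_append]
        rw [show ∀ L, List.dropWhile (· == ' ') (' '::L) = List.dropWhile (· == ' ') L
          from fun L => by simp [List.dropWhile]]
        simp only [List.length_cons]
        push_cast
        omega
      · rw [if_neg ht, if_neg hsp, if_neg ht]
        simp only [List.cons_append, List.nil_append]
        rw [List.dropWhile_cons_of_neg (by simpa using hsp)]
        simp

theorem indent_eq (s : String) : leading_indent_width s = indent_cols s := by
  unfold leading_indent_width indent_cols
  simp only []
  rw [PySem.Str.len_eq, PySem.Str.toList_replace]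
  rw [show ("\t" : String).toList = ['\t'] from by decide,
      show ("    " : String).toList = [' ',' ',' ',' '] from by decide]
  rw [replace_single]
  exact indent_list s.toList

theorem bodyGo_eq (lines : List String) (indent : Int) (idxs : List Int) :
    find_python_symbol_end_go lines indent idxs
      = ((idxs.find? (pvQ lines indent)).getD (lines.length : Int)) := by
  induction idxs with
  | nil => rfl
  | cons idx rest ih =>
    rw [find_python_symbol_end_go, List.find?_cons]
    simp only [pvQ]
    by_cases h1 : PySem.Str.strip (PySem.List.pyGetD lines idx "") = ""
    · rw [if_pos h1, decide_eq_false (by simp [h1]), ih]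
    · rw [if_neg h1]
      by_cases h2 : leading_indent_width (PySem.List.pyGetD lines idx "") ≤ indent ∧
          PySem.Str.startswith (PySem.Str.strip (PySem.List.pyGetD lines idx "")) "#" = false
      · rw [if_pos h2, decide_eq_true (by exact ⟨h1, h2.2, by rw [← indent_eq]; exact h2.1⟩)]
        rfl
      · rw [if_neg h2, decide_eq_false (by
          intro ⟨_, ha, hb⟩
          exact h2 ⟨by rw [indent_eq]; exact hb, ha⟩), ih]

theorem altGo_false_eq (lines : List String) (s indent pb : Int) (fb : Option Int)
    (idxs : List Int) :
    find_python_symbol_end_alt_go lines s indent idxs false pb fb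
      = ((idxs.find? (pvQ lines indent)).getD (lines.length : Int)) := by
  induction idxs with
  | nil => rfl
  | cons idx rest ih =>
    rw [find_python_symbol_end_alt_go, List.find?_cons]
    simp only [pvQ, if_true]
    by_cases h : PySem.Str.strip (PySem.List.pyGetD lines idx "") ≠ "" ∧
        PySem.Str.startswith (PySem.Str.strip (PySem.List.pyGetD lines idx "")) "#" = false ∧
        indent_cols (PySem.List.pyGetD lines idx "") ≤ indent
    · rw [if_pos h, decide_eq_true h]
      rfl
    · rw [if_neg h, decide_eq_false h, ih]

theorem fb_step (q : Int → Bool) (s i : Int) (hsi : s ≤ i) (fb : Option Int)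
    (hfb : fb = (PySem.List.pyRange (s+1) i).find? q) :
    (if fb = none ∧ s < i ∧ q i = true then some i else fb)
      = (PySem.List.pyRange (s+1) (i+1)).find? q := by
  by_cases hlt : s < i
  · rw [PySem.List.pyRange_one_succ_right (by omega), List.find?_append]
    cases hq : (PySem.List.pyRange (s+1) i).find? q with
    | some x => subst hfb; rw [hq]; simp
    | none =>
      subst hfb
      rw [hq]
      by_cases hqi : q i = true
      · simp [hlt, hqi]
      · simp [hlt, hqi]
  · have hie : i = s := le_antisymm (not_lt.mp hlt) hsi
    subst hie
    rw [PySem.List.pyRange_one_eq_nil (by omega)] at hfb ⊢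
    simp [hfb]

theorem main_header (lines : List String) (indent s : Int) :
    ∀ (k : Nat) (i pb : Int) (fb : Option Int), s ≤ i → i ≤ (lines.length : Int) →
    ((lines.length : Int) - i).toNat = k →
    fb = (PySem.List.pyRange (s+1) i).find? (pvQ lines indent) →
    find_python_symbol_end_alt_go lines s indent
        (PySem.List.pyRange i (lines.length : Int)) true pb fb
      = find_python_symbol_end_go lines indent
          (PySem.List.pyRange
            (find_python_symbol_header_end_go lines s
              (PySem.List.pyRange i (lines.length : Int)) pb + 1)
            (lines.length : Int)) := by
  intro k
  induction k with
  | zero =>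
    intro i pb fb hsi hin hk hfb
    have hieq : i = (lines.length : Int) := by omega
    subst hieq
    rw [PySem.List.pyRange_one_eq_nil le_rfl]
    simp only [find_python_symbol_end_alt_go, find_python_symbol_header_end_go]
    rw [bodyGo_eq, ← hfb]
    cases fb with
    | none => rfl
    | some f => rfl
  | succ k ih =>
    intro i pb fb hsi hin hk hfb
    have hilt : i < (lines.length : Int) := by omega
    rw [PySem.List.pyRange_one_cons hilt, find_python_symbol_end_alt_go,
        find_python_symbol_header_end_go]
    simp only [Bool.true_eq_false, if_false]
    have hfb' := fb_step (pvQ lines indent) s i hsi fb hfb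
    by_cases hstr : PySem.Str.strip (PySem.List.pyGetD lines i "") = ""
    · rw [if_pos hstr, if_neg (fun h => h hstr),
          if_neg (fun h => h.2.2.1 hstr)]
      have hqi : pvQ lines indent i = false := by
        simp [pvQ, hstr]
      have hfb2 : fb = (PySem.List.pyRange (s+1) (i+1)).find? (pvQ lines indent) := by
        rw [← hfb', if_neg (fun h => by rw [hqi] at h; exact absurd h.2.2 (by simp))]
      exact ih (i+1) pb fb (by omega) (by omega) (by omega) hfb2
    · rw [if_neg hstr, if_pos hstr]
      have hcond : (fb = none ∧ s < i ∧
            PySem.Str.strip (PySem.List.pyGetD lines i "") ≠ "" ∧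
            PySem.Str.startswith (PySem.Str.strip (PySem.List.pyGetD lines i "")) "#" = false ∧
            indent_cols (PySem.List.pyGetD lines i "") ≤ indent)
          ↔ (fb = none ∧ s < i ∧ pvQ lines indent i = true) := by
        simp [pvQ]
      rw [if_congr hcond rfl rfl, hfb']
      by_cases hend : PySem.Str.endswith (PySem.Str.strip (PySem.List.pyGetD lines i "")) ":" = true ∧
          pb + (PySem.Str.count (PySem.List.pyGetD lines i "") "(" : Int)
             - (PySem.Str.count (PySem.List.pyGetD lines i "") ")" : Int) ≤ 0
      · rw [if_pos hend, if_pos hend, altGo_false_eq, bodyGo_eq]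
      · rw [if_neg hend, if_neg hend]
        exact ih (i+1) _ _ (by omega) (by omega) (by omega) rfl

-- ===== VERDICT (by name: the statement is the Claim_ definition above) =====
theorem find_python_symbol_end_spec : Claim_equal_find_python_symbol_end := by
  intro lines s indent _ _
  unfold Spec_find_python_symbol_end find_python_symbol_end find_python_symbol_end_alt
    find_python_symbol_header_end
  by_cases hs : s ≤ (lines.length : Int)
  · exact (main_header lines indent s ((lines.length : Int) - s).toNat s 0 none le_rfl hs rfl
      (by rw [PySem.List.pyRange_one_eq_nil (by omega)]; rfl)).symm
  · rw [PySem.List.pyRange_one_eq_nil (by omega)]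
    simp only [find_python_symbol_header_end_go, find_python_symbol_end_alt_go]
    rw [PySem.List.pyRange_one_eq_nil (by omega)]
    rfl
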